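-- pv_equiv track=rewrite | github.com/Hojung-Jeong/Silver-Bullet-Encryption-Tool | silver_bullet/bitwise.py | nor
-- ===== SOURCE A (Python) =====
-- def nor(int1, int2):
-- 	ored=int1|int2
-- 	bint=list(bin(ored))[2:]
-- 	holder=[]
--
-- 	for element in bint:
-- 		if element=='1':
-- 			holder.append('0')
-- 		elif element=='0':
-- 			holder.append('1')
--
-- 	return int(''.join(holder), 2)
-- ===== SOURCE B (Python) =====
-- def nor(int1, int2):
--     n = abs(int1 | int2)
--     return ((1 << max(n.bit_length(), 1)) - 1) ^ n
-- ===== Notes on version B (the rewrite author's own statement) =====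
-- stated objective: simpler
-- what changed: Replaced the build-binary-string / flip-each-character loop / reparse-base-2 pipeline with a closed-form bitwise computation: XOR the magnitude of int1|int2 against an all-ones mask of its bit width (max(bit_length,1) naturally covers the zero case).
import Mathlib
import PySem

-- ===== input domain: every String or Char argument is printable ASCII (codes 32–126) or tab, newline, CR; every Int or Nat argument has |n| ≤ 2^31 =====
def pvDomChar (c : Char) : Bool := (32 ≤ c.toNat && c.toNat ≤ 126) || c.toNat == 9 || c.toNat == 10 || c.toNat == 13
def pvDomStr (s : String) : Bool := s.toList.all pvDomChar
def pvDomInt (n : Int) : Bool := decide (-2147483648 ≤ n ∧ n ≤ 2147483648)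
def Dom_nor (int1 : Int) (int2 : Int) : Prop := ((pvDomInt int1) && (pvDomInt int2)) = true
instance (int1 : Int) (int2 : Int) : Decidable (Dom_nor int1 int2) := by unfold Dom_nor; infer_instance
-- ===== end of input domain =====

-- B replaces A's per-character binary-string flip loop by a closed-form XOR against an
-- all-ones mask of the magnitude's bit width (objective: simpler).

-- ===== PORT A =====

-- binary digits of n, most significant first (the digits part of Python's bin; empty for 0)
def binDigits : Nat → List Char
  | 0 => []
  | n + 1 => binDigits ((n + 1) / 2) ++ [if (n + 1) % 2 = 1 then '1' else '0']
decreasing_by exact Nat.div_lt_self (Nat.succ_pos n) (by omega)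

-- bin(z) as a character list: optional '-', then '0b', then the digits ('0' for zero); exact port of Python's bin
def pyBin (z : Int) : List Char :=
  (if z < 0 then ['-'] else []) ++ '0' :: 'b' :: (if z.natAbs = 0 then ['0'] else binDigits z.natAbs)

-- the body of A's for-loop (branches in A's order)
def norStep (h : List Char) (element : Char) : List Char :=
  if element = '1' then h ++ ['0'] else if element = '0' then h ++ ['1'] else h

def nor (int1 : Int) (int2 : Int) : Int :=
  let ored := PySem.Int.bor int1 int2
  let bint := PySem.List.slice (pyBin ored) (some 2) none
  let holder := bint.foldl norStep []
  -- int(''.join(holder), 2): exact here — holder holds only '0'/'1' and is nonempty on every input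
  holder.foldl (fun a c => 2 * a + (if c = '1' then 1 else 0)) 0

-- ===== PORT B =====
def nor_alt (int1 : Int) (int2 : Int) : Int :=
  let n := |PySem.Int.bor int1 int2|
  -- (1 << k) = 2^k; n.bit_length() = PySem.Int.bitLength n
  PySem.Int.bxor (2 ^ (max (PySem.Int.bitLength n) 1) - 1) n

-- ===== PRECONDITION & SPEC =====
def Spec_nor (int1 : Int) (int2 : Int) (out : Int) : Prop := out = nor_alt int1 int2
instance (int1 : Int) (int2 : Int) (out : Int) : Decidable (Spec_nor int1 int2 out) := by unfold Spec_nor; infer_instance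

-- ===== CLAIM (what is proved, stated in full; the proofs are below) =====
def Claim_equal_nor : Prop := ∀ (int1 : Int) (int2 : Int), Dom_nor int1 int2 → Spec_nor int1 int2 (nor int1 int2)

-- ===== LEMMAS AND PROOFS =====

-- the flip A's loop performs, as a filterMap step
def flipc (c : Char) : Option Char :=
  if c = '1' then some '0' else if c = '0' then some '1' else none

lemma foldl_norStep (l : List Char) (h : List Char) :
    l.foldl norStep h = h ++ l.filterMap flipc := by
  induction l generalizing h with
  | nil => simp
  | cons c l ih =>
    by_cases h1 : c = '1'
    · simp [norStep, flipc, h1, ih]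
    · by_cases h0 : c = '0' <;> simp [norStep, flipc, h1, h0, ih]

lemma size_half {n : Nat} (hn : 0 < n) : Nat.size n = Nat.size (n / 2) + 1 := by
  have hb : Nat.bit (decide (n % 2 = 1)) (n / 2) = n := by
    rw [Nat.bit_val]
    rcases Nat.mod_two_eq_zero_or_one n with h2 | h2 <;> simp [h2] <;> omega
  conv_lhs => rw [← hb]
  rw [Nat.size_bit (by rw [hb]; omega)]

lemma binDigits_pos {n : Nat} (hn : 0 < n) :
    binDigits n = binDigits (n / 2) ++ [if n % 2 = 1 then '1' else '0'] := by
  obtain ⟨m, rfl⟩ := Nat.exists_eq_add_of_lt hn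
  simp [binDigits]

-- value of A's parse of the flipped digits of n (accumulator-general form)
lemma parse_flip (n : Nat) (hn : 0 < n) : ∀ a : Int,
    ((binDigits n).filterMap flipc).foldl (fun a c => 2 * a + (if c = '1' then 1 else 0)) a
      = a * 2 ^ Nat.size n + ((2 ^ Nat.size n - 1 - n : Nat) : Int) := by
  induction n using Nat.strong_induction_on with
  | _ n ih =>
    intro a
    rw [binDigits_pos hn, List.filterMap_append, List.foldl_append]
    have hmod := Nat.mod_two_eq_zero_or_one n
    by_cases h2 : n / 2 = 0
    · have hn1 : n = 1 := by omega
      subst hn1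
      simp [binDigits, flipc, Nat.size_one]
      ring
    · have hlt : n / 2 < n := Nat.div_lt_self hn (by omega)
      have := ih (n / 2) hlt (by omega) a
      rw [this]
      have hsz := size_half hn
      have hub : n / 2 < 2 ^ Nat.size (n / 2) := Nat.lt_size_self _
      have h2sz : (1:Nat) ≤ 2 ^ Nat.size (n / 2) := Nat.one_le_two_pow
      have hQ : ((2:Int) ^ Nat.size (n / 2)) = ((2 ^ Nat.size (n / 2) : Nat) : Int) := by
        push_cast; ring
      have hf : a * (2:Int) ^ (Nat.size (n / 2) + 1) = 2 * (a * 2 ^ Nat.size (n / 2)) := by ring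
      have hc : ((2:Nat) ^ (Nat.size (n / 2) + 1)) = 2 * 2 ^ Nat.size (n / 2) := by ring
      rcases hmod with hm | hm
      · simp [flipc, hm, hsz]
        have hn2 : n = 2 * (n / 2) := by omega
        omega
      · simp [flipc, hm, hsz]
        have hn2 : n = 2 * (n / 2) + 1 := by omega
        omega

lemma ones_xor : ∀ (k n : Nat), n < 2 ^ k → (2 ^ k - 1) ^^^ n = 2 ^ k - 1 - n := by
  intro k
  induction k with
  | zero => intro n hn; interval_cases n; decide
  | succ k ih =>
    intro n hn
    have hb : Nat.bit (decide (n % 2 = 1)) (n / 2) = n := by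
      rw [Nat.bit_val]
      rcases Nat.mod_two_eq_zero_or_one n with h2 | h2 <;> simp [h2] <;> omega
    have hones : Nat.bit true (2 ^ k - 1) = 2 ^ (k + 1) - 1 := by
      rw [Nat.bit_val]
      have : (1:Nat) ≤ 2 ^ k := Nat.one_le_two_pow
      simp [pow_succ]; omega
    have hhalf : n / 2 < 2 ^ k := by
      have : n < 2 * 2 ^ k := by rw [two_mul]; calc n < 2 ^ (k+1) := hn
                                                  _ = 2 ^ k + 2 ^ k := by rw [pow_succ]; ring
      omega
    calc (2 ^ (k + 1) - 1) ^^^ n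
        = Nat.bit true (2 ^ k - 1) ^^^ Nat.bit (decide (n % 2 = 1)) (n / 2) := by rw [hones, hb]
      _ = Nat.bit (true != decide (n % 2 = 1)) ((2 ^ k - 1) ^^^ (n / 2)) := Nat.xor_bit _ _ _ _
      _ = Nat.bit (!decide (n % 2 = 1)) (2 ^ k - 1 - n / 2) := by rw [ih _ hhalf, Bool.true_bne]
      _ = 2 ^ (k + 1) - 1 - n := by
          rw [Nat.bit_val]
          have h1 : (1:Nat) ≤ 2 ^ k := Nat.one_le_two_pow
          rcases Nat.mod_two_eq_zero_or_one n with h2 | h2 <;> simp [h2, pow_succ] <;> omega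

lemma bitLength_eq_size : ∀ m : Nat, PySem.Int.bitLength (m : Int) = Nat.size m := by
  intro m
  induction m using Nat.strong_induction_on with
  | _ m ih =>
    by_cases h0 : m = 0
    · subst h0; decide
    · rw [PySem.Int.bitLength_natCast (by omega), ih (m / 2) (Nat.div_lt_self (by omega) (by omega)),
        ← size_half (by omega)]

-- A's value in closed form, as a function of the magnitude of the OR
lemma nor_eq (int1 int2 : Int) :
    nor int1 int2
      = (((binDigits (PySem.Int.bor int1 int2).natAbs).filterMap flipc).foldl
          (fun a c => 2 * a + (if c = '1' then 1 else 0)) 0)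
        + (if (PySem.Int.bor int1 int2).natAbs = 0 then 1 else 0) := by
  show (PySem.List.slice (pyBin (PySem.Int.bor int1 int2)) (some 2) none |>.foldl norStep []).foldl _ 0 = _
  set z := PySem.Int.bor int1 int2 with hz
  rw [show ((2:Int)) = ((2:Nat):Int) from rfl, PySem.List.slice_from_natCast]
  by_cases hneg : z < 0
  · -- drop 2 of '-'::'0'::'b'::digits leaves 'b'::digits; 'b' is skipped by the loop
    have hz0 : z.natAbs ≠ 0 := by
      intro h; rw [Int.natAbs_eq_zero] at h; omega
    simp only [pyBin, if_pos hneg, if_neg hz0]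
    rw [show ((['-'] ++ '0'::'b'::binDigits z.natAbs).drop 2) = 'b' :: binDigits z.natAbs from rfl]
    rw [foldl_norStep, List.nil_append, List.filterMap_cons]
    simp [flipc]
  · simp only [pyBin, if_neg hneg, List.nil_append, List.drop_succ_cons, List.drop_zero]
    by_cases h0 : z.natAbs = 0
    · simp [h0, binDigits]
      decide
    · simp [h0, foldl_norStep]

-- ===== VERDICT (by name: the statement is the Claim_ definition above) =====
theorem nor_spec : Claim_equal_nor := by
  intro int1 int2 _
  unfold Spec_nor nor_alt
  rw [nor_eq]
  show _ = PySem.Int.bxor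
      (2 ^ max (PySem.Int.bitLength |PySem.Int.bor int1 int2|) 1 - 1) |PySem.Int.bor int1 int2|
  set z := PySem.Int.bor int1 int2 with hz
  have habs : |z| = ((z.natAbs : Nat) : Int) := Int.abs_eq_natAbs z
  set m := z.natAbs with hm
  rw [habs, bitLength_eq_size]
  by_cases h0 : m = 0
  · rw [h0]
    simp [binDigits]
  · have hs1 : 1 ≤ Nat.size m := by
      rcases Nat.eq_zero_or_pos (Nat.size m) with h | h
      · exact absurd (Nat.size_eq_zero.mp h) h0
      · exact h
    have hpos : (0:Int) < 2 ^ Nat.size m := pow_pos (by norm_num) _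
    rw [if_neg h0, max_eq_left hs1, parse_flip m (by omega) 0,
      PySem.Int.bxor_of_nonneg (by omega) (by positivity)]
    have hub : m < 2 ^ Nat.size m := Nat.lt_size_self m
    have h1 : (1:Nat) ≤ 2 ^ Nat.size m := Nat.one_le_two_pow
    have htoNat : ((2:Int) ^ Nat.size m - 1).toNat = 2 ^ Nat.size m - 1 := by
      have : ((2:Int) ^ Nat.size m) = ((2 ^ Nat.size m : Nat) : Int) := by push_cast; ring
      omega
    rw [htoNat, Int.toNat_natCast, ones_xor _ _ hub]
    omega
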